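-- pv_equiv track=rewrite | github.com/saloaaro/TIRA1 | sequence.py | generate
-- ===== SOURCE A (Python) =====
-- def generate(n):
--     current = 10
--     step = 1
--
--     while n > 1:
--         current += step
--         step += 1
--         n -= 1
--
--     return current
-- ===== SOURCE B (Python) =====
-- def generate(n):
--     m = n - 1 if n > 1 else 0
--     return 10 + m * (m + 1) // 2
-- ===== Notes on version B (the rewrite author's own statement) =====
-- stated objective: faster
-- what changed: Replaced the while-loop that accumulates increasing steps with the closed-form triangular-number formula 10 + m*(m+1)//2 where m = max(n-1, 0).
import Mathlib
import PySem

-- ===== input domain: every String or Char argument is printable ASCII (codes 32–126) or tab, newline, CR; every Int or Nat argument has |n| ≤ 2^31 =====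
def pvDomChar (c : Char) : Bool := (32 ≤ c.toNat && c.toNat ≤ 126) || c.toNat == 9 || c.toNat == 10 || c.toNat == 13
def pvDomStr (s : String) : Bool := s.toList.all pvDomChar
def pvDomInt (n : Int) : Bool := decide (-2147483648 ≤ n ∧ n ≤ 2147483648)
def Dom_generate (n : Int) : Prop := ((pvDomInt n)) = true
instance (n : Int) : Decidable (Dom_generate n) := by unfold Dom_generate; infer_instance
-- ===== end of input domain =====

-- B replaces A's step-accumulating while-loop by the closed-form triangular sum 10 + m*(m+1)//2, m = max(n-1,0) (O(1) instead of O(n)).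


-- ===== PORT A =====
-- the while-loop: state (current, step, n), repeats while n > 1
def generateLoop (current step n : Int) : Int :=
  if n > 1 then generateLoop (current + step) (step + 1) (n - 1) else current
termination_by n.toNat
decreasing_by omega

def generate (n : Int) : Int := generateLoop 10 1 n

-- ===== PORT B =====
def generate_alt (n : Int) : Int :=
  let m : Int := if n > 1 then n - 1 else 0
  10 + PySem.Int.floordiv (m * (m + 1)) 2

-- ===== PRECONDITION & SPEC =====
def Spec_generate (n : Int) (out : Int) : Prop := out = generate_alt n
instance (n : Int) (out : Int) : Decidable (Spec_generate n out) := by unfold Spec_generate; infer_instance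

-- ===== CLAIM (what is proved, stated in full; the proofs are below) =====
def Claim_equal_generate : Prop := ∀ (n : Int), Dom_generate n → Spec_generate n (generate n)

-- ===== LEMMAS AND PROOFS =====

-- loop invariant: doubling avoids division; m = max (n-1) 0 is the number of iterations
theorem generateLoop_eq (k : Nat) : ∀ (c s n : Int), n.toNat = k →
    2 * (generateLoop c s n - c)
      = 2 * (max (n - 1) 0) * s + (max (n - 1) 0) * (max (n - 1) 0 - 1) := by
  induction k with
  | zero =>
    intro c s n hn
    have hle : n ≤ 0 := by omega
    rw [generateLoop]
    have : ¬ n > 1 := by omega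
    simp [this]
    have : max (n - 1) 0 = 0 := by omega
    rw [this]; ring
  | succ k ih =>
    intro c s n hn
    rw [generateLoop]
    by_cases h : n > 1
    · simp [h]
      have hIH := ih (c + s) (s + 1) (n - 1) (by omega)
      have h1 : max (n - 1) 0 = n - 1 := by omega
      have h2 : max (n - 1 - 1) 0 = n - 2 := by omega
      rw [h1]
      rw [h2] at hIH
      linear_combination hIH
    · simp [h]
      have : max (n - 1) 0 = 0 := by omega
      rw [this]; ring

-- ===== VERDICT (by name: the statement is the Claim_ definition above) =====
theorem generate_spec : Claim_equal_generate := by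
  intro n _
  unfold Spec_generate generate generate_alt
  have h := generateLoop_eq n.toNat 10 1 n rfl
  by_cases hn : n > 1
  · have h1 : max (n - 1) 0 = n - 1 := by omega
    rw [h1] at h
    simp only [hn, if_pos]
    have hfd : PySem.Int.floordiv ((n - 1) * (n - 1 + 1)) 2 = (n - 1) * (n - 1 + 1) / 2 := by
      simp [PySem.Int.floordiv, Int.fdiv_eq_ediv_of_nonneg]
    rw [hfd]
    have hp : (n - 1) * (n - 1 + 1) = 2 * (n - 1) * 1 + (n - 1) * (n - 1 - 1) := by ring
    generalize hL : generateLoop 10 1 n = L at h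
    rw [hp]
    generalize hq : 2 * (n - 1) * 1 + (n - 1) * (n - 1 - 1) = p at *
    omega
  · have h1 : max (n - 1) 0 = 0 := by omega
    rw [h1] at h
    simp only [hn, if_false]
    generalize hL : generateLoop 10 1 n = L at h
    simp [PySem.Int.floordiv]
    omega
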